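-- pv_equiv track=rewrite | github.com/harshitksrivastava/100DaysOfCode | array_sorted_union.py | union_of_sorted_array
-- ===== SOURCE A (Python) =====
-- def union_of_sorted_array(array_one, array_two):
--     unified_array = []
--     length_array_one = len(array_one)
--     length_array_two = len(array_two)
--     i = 0
--     j = 0
--     while i < length_array_one and j < length_array_two:
--         if array_one[i] < array_two[j]:
--             if array_one[i] not in unified_array:
--                 unified_array.append(array_one[i])
--             i += 1
--         elif array_two[j] < array_one[i]:
--             if array_two[j] not in unified_array:
--                 unified_array.append(array_two[j])
--             j += 1
--         elif array_two[j] == array_one[i]: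
--             if array_one[i] not in unified_array:
--                 unified_array.append(array_one[i])
--             i += 1
--             j += 1
--     while i < length_array_one:
--         if array_one[i] not in unified_array:
--             unified_array.append(array_one[i])
--         i += 1
--     while j < length_array_two:
--         if array_two[j] not in unified_array:
--             unified_array.append(array_two[j])
--         j += 1
--     return len(unified_array)
-- ===== SOURCE B (Python) =====
-- def union_of_sorted_array(array_one, array_two):
--     return len(set(array_one + array_two))
-- ===== Notes on version B (the rewrite author's own statement) =====
-- stated objective: faster
-- what changed: Replaces the two-pointer merge whose every append does a linear 'not in' scan over the growing result list with a single hash-set distinct count over the concatenation.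
import Mathlib
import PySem

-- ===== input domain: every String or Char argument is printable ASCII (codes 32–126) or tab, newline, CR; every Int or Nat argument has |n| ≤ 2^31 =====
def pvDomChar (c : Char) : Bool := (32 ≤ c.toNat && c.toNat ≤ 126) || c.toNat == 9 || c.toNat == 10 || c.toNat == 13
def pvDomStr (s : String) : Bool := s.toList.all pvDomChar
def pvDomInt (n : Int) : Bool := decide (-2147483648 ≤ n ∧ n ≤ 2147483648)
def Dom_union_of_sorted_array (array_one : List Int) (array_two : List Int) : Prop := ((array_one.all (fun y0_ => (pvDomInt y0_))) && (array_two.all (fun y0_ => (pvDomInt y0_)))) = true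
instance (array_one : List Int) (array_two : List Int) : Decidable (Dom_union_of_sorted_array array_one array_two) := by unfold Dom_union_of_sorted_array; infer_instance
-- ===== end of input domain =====

-- B replaces A's quadratic merge-with-linear-membership by a single set distinct count (objective: faster; measured).

-- ===== PORT A =====
-- 'if x not in unified_array: unified_array.append(x)'
def pvPush (acc : List Int) (x : Int) : List Int := if x ∈ acc then acc else acc ++ [x]

-- the first while loop (merge with two indices); a[i]/b[j] are always in range here,
-- ported as pyGetD with default 0 (exact under the loop guard)
def pvLoop1 (a b : List Int) (n m i j : Nat) (acc : List Int) : Nat × Nat × List Int :=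
  if h : i < n ∧ j < m then
    let x := PySem.List.pyGetD a (i : Int) 0
    let y := PySem.List.pyGetD b (j : Int) 0
    if x < y then pvLoop1 a b n m (i+1) j (pvPush acc x)
    else if y < x then pvLoop1 a b n m i (j+1) (pvPush acc y)
    else pvLoop1 a b n m (i+1) (j+1) (pvPush acc x)
  else (i, j, acc)
termination_by (n - i) + (m - j)
decreasing_by all_goals omega

-- the second / third while loops (drain the remaining indices)
def pvLoop2 (a : List Int) (n i : Nat) (acc : List Int) : List Int :=
  if h : i < n then pvLoop2 a n (i+1) (pvPush acc (PySem.List.pyGetD a (i : Int) 0)) else acc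
termination_by n - i
decreasing_by omega

def union_of_sorted_array (array_one : List Int) (array_two : List Int) : Int :=
  let n := array_one.length
  let m := array_two.length
  let r := pvLoop1 array_one array_two n m 0 0 []
  let acc := pvLoop2 array_one n r.1 r.2.2
  let acc := pvLoop2 array_two m r.2.1 acc
  (acc.length : Int)

-- ===== PORT B =====
def union_of_sorted_array_alt (array_one : List Int) (array_two : List Int) : Int :=
  ((PySem.Set.ofList (array_one ++ array_two)).length : Int)

-- ===== PRECONDITION & SPEC =====
def Spec_union_of_sorted_array (array_one : List Int) (array_two : List Int) (out : Int) : Prop := out = union_of_sorted_array_alt array_one array_two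
instance (array_one : List Int) (array_two : List Int) (out : Int) : Decidable (Spec_union_of_sorted_array array_one array_two out) := by unfold Spec_union_of_sorted_array; infer_instance

-- ===== CLAIM (what is proved, stated in full; the proofs are below) =====
def Claim_equal_union_of_sorted_array : Prop := ∀ (array_one : List Int) (array_two : List Int), Dom_union_of_sorted_array array_one array_two → Spec_union_of_sorted_array array_one array_two (union_of_sorted_array array_one array_two)

-- ===== LEMMAS AND PROOFS =====

theorem mem_pvPush (acc : List Int) (x y : Int) : y ∈ pvPush acc x ↔ y ∈ acc ∨ y = x := by
  unfold pvPush; split_ifs with h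
  · constructor
    · exact Or.inl
    · rintro (h' | rfl) <;> [exact h'; exact h]
  · simp
theorem nodup_pvPush (acc : List Int) (x : Int) (h : acc.Nodup) : (pvPush acc x).Nodup := by
  unfold pvPush; split_ifs with hx
  · exact h
  · refine h.append (List.nodup_singleton x) ?_
    intro z hz hz'
    simp only [List.mem_singleton] at hz'
    exact hx (hz' ▸ hz)

theorem pvLoop2_mem (a : List Int) (i : Nat) (acc : List Int) (hi : i ≤ a.length) (y : Int) :
    y ∈ pvLoop2 a a.length i acc ↔ y ∈ acc ∨ y ∈ a.drop i := by
  fun_induction pvLoop2 a a.length i acc with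
  | case1 i acc h ih =>
    have hlt : i < a.length := h
    rw [ih (by omega), mem_pvPush]
    have hg : PySem.List.pyGetD a (i : Int) 0 = a[i] := by
      simp [PySem.List.pyGetD_natCast, List.getD, List.getElem?_eq_getElem hlt]
    rw [hg, List.drop_eq_getElem_cons hlt, List.mem_cons]
    tauto
  | case2 i acc h =>
    have : i = a.length ∨ a.length ≤ i := by omega
    have hdrop : a.drop i = [] := List.drop_eq_nil_of_le (by omega)
    simp [hdrop]

theorem pvLoop2_nodup (a : List Int) (n i : Nat) (acc : List Int) (h : acc.Nodup) :
    (pvLoop2 a n i acc).Nodup := by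
  fun_induction pvLoop2 a n i acc with
  | case1 i acc hlt ih => exact ih (nodup_pvPush _ _ h)
  | case2 i acc hlt => exact h

-- full pipeline after the merge loop: membership characterisation
theorem pvLoop1_mem (a b : List Int) (i j : Nat) (acc : List Int)
    (hi : i ≤ a.length) (hj : j ≤ b.length) (y : Int) :
    y ∈ pvLoop2 b b.length (pvLoop1 a b a.length b.length i j acc).2.1
          (pvLoop2 a a.length (pvLoop1 a b a.length b.length i j acc).1
            (pvLoop1 a b a.length b.length i j acc).2.2)
      ↔ y ∈ acc ∨ y ∈ a.drop i ∨ y ∈ b.drop j := by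
  fun_induction pvLoop1 a b a.length b.length i j acc with
  | case1 i j acc h x yv hxy ih =>
    rw [ih (by omega) hj]
    rw [mem_pvPush]
    rw [List.drop_eq_getElem_cons (show i < a.length from h.1)]
    simp only [x, PySem.List.pyGetD_natCast, List.getD, List.getElem?_eq_getElem h.1,
      Option.getD_some, List.mem_cons]
    tauto
  | case2 i j acc h x yv hxy hyx ih =>
    rw [ih hi (by omega)]
    rw [mem_pvPush]
    rw [List.drop_eq_getElem_cons (show j < b.length from h.2)]
    simp only [yv, PySem.List.pyGetD_natCast, List.getD, List.getElem?_eq_getElem h.2,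
      Option.getD_some, List.mem_cons]
    tauto
  | case3 i j acc h x yv hxy hyx ih =>
    have hx : x = a[i] := by
      simp [x, PySem.List.pyGetD_natCast, List.getD, List.getElem?_eq_getElem h.1]
    have hy : yv = b[j] := by
      simp [yv, PySem.List.pyGetD_natCast, List.getD, List.getElem?_eq_getElem h.2]
    have hxyeq : a[i] = b[j] := by omega
    rw [ih (by omega) (by omega)]
    rw [mem_pvPush]
    rw [List.drop_eq_getElem_cons (show i < a.length from h.1),
        List.drop_eq_getElem_cons (show j < b.length from h.2)]
    simp only [hx, List.mem_cons, ← hxyeq]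
    tauto
  | case4 i j acc h =>
    show y ∈ pvLoop2 b b.length j (pvLoop2 a a.length i acc) ↔ _
    rw [pvLoop2_mem b j _ hj, pvLoop2_mem a i acc hi]
    tauto

theorem pvLoop1_nodup (a b : List Int) (n m i j : Nat) (acc : List Int) (h : acc.Nodup) :
    (pvLoop1 a b n m i j acc).2.2.Nodup := by
  fun_induction pvLoop1 a b n m i j acc with
  | case1 i j acc hc x yv hxy ih => exact ih (nodup_pvPush _ _ h)
  | case2 i j acc hc x yv hxy hyx ih => exact ih (nodup_pvPush _ _ h)
  | case3 i j acc hc x yv hxy hyx ih => exact ih (nodup_pvPush _ _ h)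
  | case4 i j acc hc => exact h

-- ===== VERDICT (by name: the statement is the Claim_ definition above) =====
theorem union_of_sorted_array_spec : Claim_equal_union_of_sorted_array := by
  intro a b _
  unfold Spec_union_of_sorted_array union_of_sorted_array union_of_sorted_array_alt
  have hmem := pvLoop1_mem a b 0 0 [] (Nat.zero_le _) (Nat.zero_le _)
  have hnodA : (pvLoop2 b b.length (pvLoop1 a b a.length b.length 0 0 []).2.1
      (pvLoop2 a a.length (pvLoop1 a b a.length b.length 0 0 []).1
        (pvLoop1 a b a.length b.length 0 0 []).2.2)).Nodup :=
    pvLoop2_nodup _ _ _ _ (pvLoop2_nodup _ _ _ _ (pvLoop1_nodup a b _ _ _ _ _ List.nodup_nil))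
  have hperm : (pvLoop2 b b.length (pvLoop1 a b a.length b.length 0 0 []).2.1
      (pvLoop2 a a.length (pvLoop1 a b a.length b.length 0 0 []).1
        (pvLoop1 a b a.length b.length 0 0 []).2.2)).Perm (PySem.Set.ofList (a ++ b)) := by
    rw [List.perm_ext_iff_of_nodup hnodA (PySem.Set.nodup_ofList (a ++ b))]
    intro y
    rw [hmem y, PySem.Set.mem_ofList]
    simp
  show (((pvLoop2 b b.length (pvLoop1 a b a.length b.length 0 0 []).2.1
      (pvLoop2 a a.length (pvLoop1 a b a.length b.length 0 0 []).1
        (pvLoop1 a b a.length b.length 0 0 []).2.2)).length : Nat) : Int)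
    = ((PySem.Set.ofList (a ++ b)).length : Int)
  exact_mod_cast hperm.length_eq
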